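-- pv_equiv track=rewrite | github.com/kuznetsovvj/education | algorithms/codeforces/1343c.py | check
-- ===== SOURCE A (Python) =====
-- def check(seq):
--     positive = seq[0] > 0
--     cur_max = seq[0]
--     res = 0
--     for item in seq:
--         if positive ^ (item > 0) == False:
--             cur_max = max(cur_max, item)
--         else:
--             res += cur_max
--             positive = item > 0
--             cur_max = item
--     res += cur_max
--     return res
-- ===== SOURCE B (Python) =====
-- def check(seq):
--     # Build maximal runs of same sign-key (x > 0), then sum each run's maximum.
--     runs = []
--     for x in seq:
--         if runs and (runs[-1][-1] > 0) == (x > 0):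
--             runs[-1].append(x)
--         else:
--             runs.append([x])
--     return sum(max(r) for r in runs)
-- ===== Notes on version B (the rewrite author's own statement) =====
-- stated objective: idiomatic
-- what changed: Replaces the online positive/cur_max/res state machine with a build-runs-then-reduce decomposition: group seq into maximal same-sign runs, then sum each run's maximum.
import Mathlib
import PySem

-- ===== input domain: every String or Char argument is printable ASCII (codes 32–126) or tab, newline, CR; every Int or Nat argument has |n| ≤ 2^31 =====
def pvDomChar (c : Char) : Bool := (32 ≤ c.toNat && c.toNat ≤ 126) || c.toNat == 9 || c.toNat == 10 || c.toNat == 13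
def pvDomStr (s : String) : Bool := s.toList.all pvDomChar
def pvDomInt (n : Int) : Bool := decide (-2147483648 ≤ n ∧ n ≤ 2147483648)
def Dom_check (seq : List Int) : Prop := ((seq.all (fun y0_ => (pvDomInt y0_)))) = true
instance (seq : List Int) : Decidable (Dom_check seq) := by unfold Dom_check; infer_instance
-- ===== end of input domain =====

-- B replaces A's online positive/cur_max/res state machine by grouping seq into
-- maximal same-sign runs and summing each run's maximum (same O(n) cost).

-- ===== PORT A =====
-- one loop step of A: state = (positive, cur_max, res)
def checkStep (st : Bool × Int × Int) (item : Int) : Bool × Int × Int :=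
  if ((st.1 != decide (item > 0)) == false) then
    (st.1, max st.2.1 item, st.2.2)
  else
    (decide (item > 0), item, st.2.2 + st.2.1)

def check (seq : List Int) : Int :=
  -- seq[0]; Pre_check excludes [], where Python raises IndexError (getD 0 is never used there)
  let s0 : Int := (PySem.List.pyGet? seq 0).getD 0
  let st := seq.foldl checkStep (decide (s0 > 0), s0, 0)
  st.2.2 + st.2.1

-- ===== PORT B =====
-- max(r): runs built below are always nonempty, so the [] case is unreachable
def pyMaxNE (r : List Int) : Int :=
  match r with
  | [] => 0
  | h :: t => t.foldl max h

-- one loop step of B: append x to the last run if it has the same sign-key, else start a new run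
def addRun (runs : List (List Int)) (x : Int) : List (List Int) :=
  match runs.getLast? with
  | none => runs ++ [[x]]
  | some r =>
    if (decide ((r.getLast?.getD 0) > 0) == decide (x > 0)) then
      runs.dropLast ++ [r ++ [x]]
    else
      runs ++ [[x]]

def check_alt (seq : List Int) : Int :=
  ((seq.foldl addRun []).map pyMaxNE).sum

-- ===== PRECONDITION & SPEC =====
-- Pre_ excludes exactly the empty list, on which A raises IndexError (seq[0]).
def Pre_check (seq : List Int) : Prop := seq ≠ []
instance (seq : List Int) : Decidable (Pre_check seq) := by unfold Pre_check; infer_instance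
def pvWitness_check : List Int := [1, -2, 3]

def Spec_check (seq : List Int) (out : Int) : Prop := out = check_alt seq
instance (seq : List Int) (out : Int) : Decidable (Spec_check seq out) := by unfold Spec_check; infer_instance

-- ===== CLAIM (what is proved, stated in full; the proofs are below) =====
def Claim_equal_check : Prop := ∀ (seq : List Int), Dom_check seq → Pre_check seq → Spec_check seq (check seq)

-- ===== LEMMAS AND PROOFS =====

-- common reference function: sum of maxima of runs, given current key k and current max m
def sumRuns (k : Bool) (m : Int) : List Int → Int
  | [] => m
  | x :: t => if decide (x > 0) == k then sumRuns k (max m x) t else m + sumRuns (decide (x > 0)) x t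

theorem checkLoop_eq (rest : List Int) : ∀ (k : Bool) (m res : Int),
    (rest.foldl checkStep (k, m, res)).2.2 + (rest.foldl checkStep (k, m, res)).2.1
      = res + sumRuns k m rest := by
  induction rest with
  | nil => intro k m res; simp [sumRuns]
  | cons x t ih =>
    intro k m res
    rcases Bool.eq_false_or_eq_true k with hk | hk <;> subst hk <;>
      by_cases hx : x > 0 <;>
      simp [checkStep, sumRuns, hx, ih, add_assoc]

theorem pyMaxNE_concat (r : List Int) (x : Int) (h : r ≠ []) :
    pyMaxNE (r ++ [x]) = max (pyMaxNE r) x := by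
  cases r with
  | nil => simp at h
  | cons a t =>
    simp [pyMaxNE]

theorem addRunLoop_eq (rest : List Int) : ∀ (init : List (List Int)) (r' : List Int) (l : Int),
    (((rest.foldl addRun (init ++ [r' ++ [l]])).map pyMaxNE).sum)
      = ((init.map pyMaxNE).sum) + sumRuns (decide (l > 0)) (pyMaxNE (r' ++ [l])) rest := by
  induction rest with
  | nil => intro init r' l; simp [sumRuns]
  | cons x t ih =>
    intro init r' l
    have hlast : (init ++ [r' ++ [l]]).getLast? = some (r' ++ [l]) := by
      simp [List.getLast?_append]
    have hl : (r' ++ [l]).getLast? = some l := by simp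
    by_cases h : decide (x > 0) = decide (l > 0)
    · have hstep : addRun (init ++ [r' ++ [l]]) x = init ++ [(r' ++ [l]) ++ [x]] := by
        simp [addRun, hlast, hl, h]
      have hm : pyMaxNE ((r' ++ [l]) ++ [x]) = max (pyMaxNE (r' ++ [l])) x :=
        pyMaxNE_concat _ _ (by simp)
      rw [List.foldl_cons, hstep, ih init (r' ++ [l]) x, hm]
      simp [sumRuns, h]
    · have hstep : addRun (init ++ [r' ++ [l]]) x = (init ++ [r' ++ [l]]) ++ [[x]] := by
        have hne : (decide (l > 0) == decide (x > 0)) = false := by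
          cases hlp : decide (l > 0) <;> cases hx : decide (x > 0) <;> simp_all
        simp [addRun, hlast, hl, hne]
      have := ih (init ++ [r' ++ [l]]) [] x
      simp only [List.nil_append] at this
      rw [List.foldl_cons, hstep, this]
      simp [sumRuns, h, pyMaxNE]
      ring

-- ===== VERDICT (by name: the statement is the Claim_ definition above) =====
theorem check_spec : Claim_equal_check := by
  intro seq _ hpre
  unfold Spec_check
  cases seq with
  | nil => exact absurd rfl hpre
  | cons h t =>
    unfold check check_alt
    have h0 : (PySem.List.pyGet? (h :: t) 0).getD 0 = h := by
      simp [PySem.List.pyGet?, PySem.List.pyIdx?]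
    simp only [h0]
    have hA : (h :: t).foldl checkStep (decide (h > 0), h, 0)
        = t.foldl checkStep (decide (h > 0), h, 0) := by
      simp [checkStep]
    have hB : (h :: t).foldl addRun [] = t.foldl addRun ([] ++ [[] ++ [h]]) := by
      simp [addRun]
    rw [hA, hB, checkLoop_eq, addRunLoop_eq]
    simp [pyMaxNE]
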